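-- pv_equiv track=rewrite | github.com/jhacksman/ai-core | src/mcp/meta_server.py | _analyze_api_capabilities
-- ===== SOURCE A (Python) =====
-- from typing import Dict, List, Optional, Any, Union
--
-- def _analyze_api_capabilities(spec: Dict[str, Any]) -> List[str]:
--     """Analyze API capabilities from OpenAPI spec."""
--     capabilities = []
--
--     paths = spec.get('paths', {})
--
--     if any('user' in path.lower() for path in paths):
--         capabilities.append("user_management")
--
--     if any('auth' in path.lower() or 'login' in path.lower() for path in paths):
--         capabilities.append("authentication")
--
--     if any('file' in path.lower() or 'upload' in path.lower() for path in paths):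
--         capabilities.append("file_operations")
--
--     if any('search' in path.lower() for path in paths):
--         capabilities.append("search")
--
--     if any('webhook' in path.lower() for path in paths):
--         capabilities.append("webhooks")
--
--     methods = set()
--     for path_methods in paths.values():
--         methods.update(path_methods.keys())
--
--     if 'post' in methods:
--         capabilities.append("data_creation")
--     if 'put' in methods or 'patch' in methods:
--         capabilities.append("data_modification")
--     if 'delete' in methods:
--         capabilities.append("data_deletion")
--     if 'get' in methods:
--         capabilities.append("data_retrieval")
--
--     return capabilities
-- ===== SOURCE B (Python) =====
-- def _analyze_api_capabilities(spec):
--     """Analyze API capabilities from OpenAPI spec (single-pass version)."""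
--     paths = spec.get('paths', {})
--
--     has_user = has_auth = has_file = has_search = has_webhook = False
--     methods = set()
--     for path, path_methods in paths.items():
--         low = path.lower()
--         has_user = has_user or 'user' in low
--         has_auth = has_auth or 'auth' in low or 'login' in low
--         has_file = has_file or 'file' in low or 'upload' in low
--         has_search = has_search or 'search' in low
--         has_webhook = has_webhook or 'webhook' in low
--         methods.update(path_methods.keys())
--
--     return (
--         (["user_management"] if has_user else [])
--         + (["authentication"] if has_auth else [])
--         + (["file_operations"] if has_file else [])
--         + (["search"] if has_search else [])
--         + (["webhooks"] if has_webhook else [])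
--         + (["data_creation"] if 'post' in methods else [])
--         + (["data_modification"] if 'put' in methods or 'patch' in methods else [])
--         + (["data_deletion"] if 'delete' in methods else [])
--         + (["data_retrieval"] if 'get' in methods else [])
--     )
-- ===== Notes on version B (the rewrite author's own statement) =====
-- stated objective: alternative
-- what changed: Replaces A's five independent any() scans over the paths plus a separate method-collecting loop (six traversals) with one single pass that ORs five boolean flags and accumulates the method set together, then assembles the capability list by concatenating flag-guarded segments instead of conditional appends.
import Mathlib
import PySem

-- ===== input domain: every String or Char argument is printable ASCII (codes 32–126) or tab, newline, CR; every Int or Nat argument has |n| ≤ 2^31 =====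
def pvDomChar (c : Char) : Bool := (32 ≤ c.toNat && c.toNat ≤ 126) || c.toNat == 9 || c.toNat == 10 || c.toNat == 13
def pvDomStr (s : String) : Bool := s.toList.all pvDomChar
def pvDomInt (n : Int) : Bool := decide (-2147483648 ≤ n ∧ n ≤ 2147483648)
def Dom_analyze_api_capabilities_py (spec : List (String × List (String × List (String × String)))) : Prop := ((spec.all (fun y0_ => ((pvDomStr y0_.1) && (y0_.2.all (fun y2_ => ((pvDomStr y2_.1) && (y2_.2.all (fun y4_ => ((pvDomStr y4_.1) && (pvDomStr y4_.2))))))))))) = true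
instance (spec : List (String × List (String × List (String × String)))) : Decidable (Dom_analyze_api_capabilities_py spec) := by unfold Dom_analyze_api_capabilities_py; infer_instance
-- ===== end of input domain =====

-- ===== PORT A =====
-- Literal port of A: five independent any() scans over the paths, then a
-- separate loop collecting the method set, appending capabilities in order.
def analyze_api_capabilities_py (spec : List (String × List (String × List (String × String)))) : List String :=
  let paths := PySem.Dict.getD (PySem.Dict.mk spec) "paths" []
  let capabilities : List String := []
  let capabilities := if paths.any (fun p => PySem.Str.isIn "user" (PySem.Str.lower p.1)) then capabilities ++ ["user_management"] else capabilities
  let capabilities := if paths.any (fun p => PySem.Str.isIn "auth" (PySem.Str.lower p.1) || PySem.Str.isIn "login" (PySem.Str.lower p.1)) then capabilities ++ ["authentication"] else capabilities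
  let capabilities := if paths.any (fun p => PySem.Str.isIn "file" (PySem.Str.lower p.1) || PySem.Str.isIn "upload" (PySem.Str.lower p.1)) then capabilities ++ ["file_operations"] else capabilities
  let capabilities := if paths.any (fun p => PySem.Str.isIn "search" (PySem.Str.lower p.1)) then capabilities ++ ["search"] else capabilities
  let capabilities := if paths.any (fun p => PySem.Str.isIn "webhook" (PySem.Str.lower p.1)) then capabilities ++ ["webhooks"] else capabilities
  let methods : PySem.Set String := paths.foldl (fun m p => PySem.Set.update m (p.2.map Prod.fst)) PySem.Set.empty
  let capabilities := if PySem.Set.contains methods "post" then capabilities ++ ["data_creation"] else capabilities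
  let capabilities := if PySem.Set.contains methods "put" || PySem.Set.contains methods "patch" then capabilities ++ ["data_modification"] else capabilities
  let capabilities := if PySem.Set.contains methods "delete" then capabilities ++ ["data_deletion"] else capabilities
  let capabilities := if PySem.Set.contains methods "get" then capabilities ++ ["data_retrieval"] else capabilities
  capabilities

-- ===== PORT B =====
-- B: ONE pass over the paths ORs the five flags and accumulates the method set
-- together; the result is assembled by concatenating flag-guarded segments.
def pvAltStep (st : Bool × Bool × Bool × Bool × Bool × PySem.Set String)
    (p : String × List (String × String)) :
    Bool × Bool × Bool × Bool × Bool × PySem.Set String :=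
  let low := PySem.Str.lower p.1
  (st.1 || PySem.Str.isIn "user" low,
   st.2.1 || PySem.Str.isIn "auth" low || PySem.Str.isIn "login" low,
   st.2.2.1 || PySem.Str.isIn "file" low || PySem.Str.isIn "upload" low,
   st.2.2.2.1 || PySem.Str.isIn "search" low,
   st.2.2.2.2.1 || PySem.Str.isIn "webhook" low,
   PySem.Set.update st.2.2.2.2.2 (p.2.map Prod.fst))

def analyze_api_capabilities_py_alt (spec : List (String × List (String × List (String × String)))) : List String :=
  let paths := PySem.Dict.getD (PySem.Dict.mk spec) "paths" []
  let st := paths.foldl pvAltStep (false, false, false, false, false, PySem.Set.empty)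
  let methods := st.2.2.2.2.2
  (if st.1 then ["user_management"] else [])
    ++ (if st.2.1 then ["authentication"] else [])
    ++ (if st.2.2.1 then ["file_operations"] else [])
    ++ (if st.2.2.2.1 then ["search"] else [])
    ++ (if st.2.2.2.2.1 then ["webhooks"] else [])
    ++ (if PySem.Set.contains methods "post" then ["data_creation"] else [])
    ++ (if PySem.Set.contains methods "put" || PySem.Set.contains methods "patch" then ["data_modification"] else [])
    ++ (if PySem.Set.contains methods "delete" then ["data_deletion"] else [])
    ++ (if PySem.Set.contains methods "get" then ["data_retrieval"] else [])

-- ===== PRECONDITION & SPEC =====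
def Spec_analyze_api_capabilities_py (spec : List (String × List (String × List (String × String)))) (out : List String) : Prop := out = analyze_api_capabilities_py_alt spec
instance (spec : List (String × List (String × List (String × String)))) (out : List String) : Decidable (Spec_analyze_api_capabilities_py spec out) := by unfold Spec_analyze_api_capabilities_py; infer_instance

-- ===== CLAIM (what is proved, stated in full; the proofs are below) =====
def Claim_equal_analyze_api_capabilities_py : Prop := ∀ (spec : List (String × List (String × List (String × String)))), Dom_analyze_api_capabilities_py spec → Spec_analyze_api_capabilities_py spec (analyze_api_capabilities_py spec)

-- ===== LEMMAS AND PROOFS =====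

-- B's single fold computes exactly A's five any-scans and A's method-set fold.
theorem pvAltStep_foldl (paths : List (String × List (String × String)))
    (a b c d e : Bool) (m : PySem.Set String) :
    paths.foldl pvAltStep (a, b, c, d, e, m) =
      (a || paths.any (fun p => PySem.Str.isIn "user" (PySem.Str.lower p.1)),
       b || paths.any (fun p => PySem.Str.isIn "auth" (PySem.Str.lower p.1) || PySem.Str.isIn "login" (PySem.Str.lower p.1)),
       c || paths.any (fun p => PySem.Str.isIn "file" (PySem.Str.lower p.1) || PySem.Str.isIn "upload" (PySem.Str.lower p.1)),
       d || paths.any (fun p => PySem.Str.isIn "search" (PySem.Str.lower p.1)),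
       e || paths.any (fun p => PySem.Str.isIn "webhook" (PySem.Str.lower p.1)),
       paths.foldl (fun m p => PySem.Set.update m (p.2.map Prod.fst)) m) := by
  induction paths generalizing a b c d e m with
  | nil => simp
  | cons hd tl ih =>
    simp only [List.foldl_cons, List.any_cons, pvAltStep, ih, Bool.or_assoc]

-- conditional append pushed to a conditional segment
theorem pvIfAppend (b : Bool) (l s : List String) :
    (if b then l ++ s else l) = l ++ (if b then s else []) := by
  cases b <;> simp

theorem analyze_api_capabilities_eq (spec : List (String × List (String × List (String × String)))) :
    analyze_api_capabilities_py spec = analyze_api_capabilities_py_alt spec := by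
  unfold analyze_api_capabilities_py analyze_api_capabilities_py_alt
  simp only [pvAltStep_foldl, Bool.false_or, pvIfAppend, List.nil_append]

-- ===== VERDICT (by name: the statement is the Claim_ definition above) =====
theorem analyze_api_capabilities_py_spec : Claim_equal_analyze_api_capabilities_py := by
  intro spec _
  unfold Spec_analyze_api_capabilities_py
  exact analyze_api_capabilities_eq spec
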